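-- pv_equiv track=rewrite | github.com/srikanthmallisetti/algorithmic-toolbox | lc-ds_algo_crash_course/Hashing/countingElements.py | count_ele
-- ===== SOURCE A (Python) =====
-- def count_ele(nums: list[int]) -> int:
--     ans = 0
--     num_map = {}
--     for num in nums:
--         num_map[num] = num_map.get(num, 0) + 1
--
--     for num in num_map:
--         if num + 1 in num_map:
--             ans += num_map[num]
--
--     return ans
-- ===== SOURCE B (Python) =====
-- def count_ele(nums: list[int]) -> int:
--     # Sort, then one linear scan over runs of equal values: when the run of
--     # value prev ends and the next value is prev + 1, the whole run counts.
--     s = sorted(nums)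
--     ans = 0
--     run = 0
--     prev = None
--     for v in s:
--         if prev is None or v == prev:
--             run += 1
--         else:
--             if v == prev + 1:
--                 ans += run
--             run = 1
--         prev = v
--     return ans
-- ===== Notes on version B (the rewrite author's own statement) =====
-- stated objective: alternative
-- what changed: Replaces the hash-based frequency dict and per-key membership lookups by sort-then-scan: B sorts the list and makes one linear pass over adjacent runs of equal values, adding a run's length when the next run is its successor; no hash structure or membership test remains. Measured faster (constant factor): the C-level sort plus a branch-only scan avoids per-element dict hashing and lookups.
import Mathlib
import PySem

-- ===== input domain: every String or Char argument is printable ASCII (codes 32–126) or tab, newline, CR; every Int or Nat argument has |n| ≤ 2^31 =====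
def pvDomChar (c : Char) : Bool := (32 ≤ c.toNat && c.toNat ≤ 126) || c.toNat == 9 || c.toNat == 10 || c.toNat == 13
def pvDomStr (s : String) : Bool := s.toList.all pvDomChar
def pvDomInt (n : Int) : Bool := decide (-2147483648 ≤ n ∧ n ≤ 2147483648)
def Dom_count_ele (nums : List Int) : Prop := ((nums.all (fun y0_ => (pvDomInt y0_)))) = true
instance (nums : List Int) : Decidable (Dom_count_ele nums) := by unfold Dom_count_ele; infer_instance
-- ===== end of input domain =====

-- B replaces A's frequency dict + per-key hash lookups by sort-then-scan over runs of
-- equal values (objective: alternative algorithm, no hash structure).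

-- ===== PORT A =====
-- literal transliteration: build counter dict, then loop over its keys summing counts
def count_ele (nums : List Int) : Int :=
  let numMap : PySem.Dict Int Int :=
    nums.foldl (fun d num => d.insert num (d.getD num 0 + 1)) PySem.Dict.empty
  numMap.keys.foldl
    (fun ans num => if numMap.contains (num + 1) then ans + numMap.getD num 0 else ans) 0

-- ===== PORT B =====
-- literal transliteration of Source B: sort, then one pass tracking (ans, run, prev)
def count_ele_alt (nums : List Int) : Int :=
  let s := PySem.List.sorted nums (fun x => x) false
  let st := s.foldl
    (fun (st : Int × Int × Option Int) v =>
      match st with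
      | (ans, run, none) => (ans, run + 1, some v)
      | (ans, run, some p) =>
        if v = p then (ans, run + 1, some v)
        else if v = p + 1 then (ans + run, 1, some v)
        else (ans, 1, some v)) (0, 0, none)
  st.1

-- ===== PRECONDITION & SPEC =====
def Spec_count_ele (nums : List Int) (out : Int) : Prop := out = count_ele_alt nums
instance (nums : List Int) (out : Int) : Decidable (Spec_count_ele nums out) := by unfold Spec_count_ele; infer_instance

-- ===== CLAIM (what is proved, stated in full; the proofs are below) =====
def Claim_equal_count_ele : Prop := ∀ (nums : List Int), Dom_count_ele nums → Spec_count_ele nums (count_ele nums)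

-- ===== LEMMAS AND PROOFS =====

-- the common value both ports compute: how many elements of l have their successor in m
def pvSumInd (m l : List Int) : Int :=
  (l.map (fun n => if (n + 1) ∈ m then (1 : Int) else 0)).sum

-- ---- A-side lemmas ----

-- a conditional-accumulate foldl is the sum of an indicator map
theorem pv_foldl_if_add (p : Int → Bool) (f : Int → Int) :
    ∀ (l : List Int) (a : Int),
      l.foldl (fun s n => if p n then s + f n else s) a
        = a + (l.map (fun n => if p n then f n else 0)).sum := by
  intro l
  induction l with
  | nil => intro a; simp
  | cons x l ih =>
      intro a
      simp only [List.foldl_cons, List.map_cons, List.sum_cons, ih]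
      split_ifs <;> ring

theorem pv_sum_map_add (f g : Int → Int) :
    ∀ (l : List Int), (l.map (fun k => f k + g k)).sum = (l.map f).sum + (l.map g).sum := by
  intro l
  induction l with
  | nil => simp
  | cons x l ih => simp [ih]; ring

theorem pv_sum_single (g : Int → Int) (x : Int) :
    ∀ (d : List Int), d.Nodup → x ∈ d →
      (d.map (fun k => if k = x then g k else 0)).sum = g x := by
  intro d
  induction d with
  | nil => intro _ h; cases h
  | cons y d ih =>
      intro hnd hx
      rcases List.nodup_cons.mp hnd with ⟨hy, hnd'⟩
      rcases List.mem_cons.mp hx with rfl | hx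
      · have : (d.map (fun k => if k = x then g k else 0)).sum = 0 := by
          have : ∀ k ∈ d, (if k = x then g k else 0) = 0 := by
            intro k hk
            have : k ≠ x := by rintro rfl; exact hy hk
            simp [this]
          rw [List.map_congr_left this]
          simp
        simp [this]
      · have hyx : y ≠ x := by rintro rfl; exact hy hx
        simp [hyx, ih hnd' hx]

-- summing counts over a nodup cover of l equals counting over l itself
theorem pv_main (p : Int → Bool) :
    ∀ (l d : List Int), d.Nodup → (∀ y ∈ l, y ∈ d) →
      (d.map (fun k => if p k then (l.count k : Int) else 0)).sum
        = (l.map (fun n => if p n then (1 : Int) else 0)).sum := by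
  intro l
  induction l with
  | nil =>
      intro d _ _
      have : ∀ k ∈ d, (if p k then (([] : List Int).count k : Int) else 0) = 0 := by
        intro k _; simp
      rw [List.map_congr_left this]; simp
  | cons x l ih =>
      intro d hnd hcov
      have hx : x ∈ d := hcov x (by simp)
      have hcov' : ∀ y ∈ l, y ∈ d := fun y hy => hcov y (by simp [hy])
      have hsplit : ∀ k ∈ d,
          (if p k then ((x :: l).count k : Int) else 0)
            = (if p k then (l.count k : Int) else 0) + (if k = x then (if p k then (1:Int) else 0) else 0) := by
        intro k _
        by_cases hkx : k = x
        · subst hkx; simp; split_ifs <;> simp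
        · have hxk : ¬ x = k := fun h => hkx h.symm
          have : (x :: l).count k = l.count k := by
            simp [hxk]
          simp [this, hkx]
      rw [List.map_congr_left hsplit, pv_sum_map_add,
          ih d hnd hcov', pv_sum_single (fun k => if p k then (1:Int) else 0) x d hnd hx]
      exact add_comm _ _

-- A computes pvSumInd nums nums
theorem pv_A_eq (nums : List Int) : count_ele nums = pvSumInd nums nums := by
  unfold count_ele pvSumInd
  rw [PySem.Dict.foldl_insert_getD_add_one_eq_counter]
  rw [pv_foldl_if_add (fun num => (PySem.Dict.counter nums).contains (num + 1))
        (fun num => (PySem.Dict.counter nums).getD num 0)]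
  simp only [PySem.Dict.getD_counter, PySem.Dict.keys_counter, PySem.Dict.contains_counter]
  rw [pv_main _ nums (PySem.Set.ofList nums) (PySem.Set.nodup_ofList nums)
        (fun y hy => (PySem.Set.mem_ofList nums y).mpr hy)]
  rw [zero_add]
  apply congrArg
  apply List.map_congr_left
  intro n _
  by_cases h : (n + 1) ∈ nums <;> simp [h]

-- ---- B-side lemmas ----

-- the scan's step function, named so the invariant can speak about it
def pvStep (st : Int × Int × Option Int) (v : Int) : Int × Int × Option Int :=
  match st with
  | (ans, run, none) => (ans, run + 1, some v)
  | (ans, run, some p) =>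
    if v = p then (ans, run + 1, some v)
    else if v = p + 1 then (ans + run, 1, some v)
    else (ans, 1, some v)

-- the indicator of elements of a sorted tail ignores the head
theorem pv_sumInd_tail (v : Int) (rest : List Int) (hge : ∀ x ∈ rest, v ≤ x) :
    pvSumInd (v :: rest) rest = pvSumInd rest rest := by
  unfold pvSumInd
  apply congrArg
  apply List.map_congr_left
  intro w hw
  have hne : w + 1 ≠ v := by have := hge w hw; omega
  simp [List.mem_cons, hne]

-- peeling the head off the common value, on a sorted list
theorem pv_sumInd_cons (v : Int) (rest : List Int) (hvr : ∀ x ∈ rest, v ≤ x) :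
    pvSumInd (v :: rest) (v :: rest)
      = (if (v + 1) ∈ rest then (1 : Int) else 0) + pvSumInd rest rest := by
  have hvne : v + 1 ≠ v := by omega
  unfold pvSumInd
  rw [List.map_cons, List.sum_cons]
  rw [show (rest.map (fun n => if (n + 1) ∈ v :: rest then (1:Int) else 0)).sum
        = pvSumInd (v :: rest) rest from rfl, pv_sumInd_tail v rest hvr]
  have hmem : ((v + 1) ∈ v :: rest) ↔ ((v + 1) ∈ rest) := by
    simp [List.mem_cons, hvne]
  by_cases h : (v + 1) ∈ rest <;> simp [hmem, h, pvSumInd]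

-- invariant of the run scan over a sorted suffix
theorem pv_scan_inv :
    ∀ (s : List Int), s.Pairwise (· ≤ ·) →
      ∀ (ans run p : Int), (∀ x ∈ s, p ≤ x) →
        (s.foldl pvStep (ans, run, some p)).1
          = ans + (if (p + 1) ∈ s then run else 0) + pvSumInd s s := by
  intro s
  induction s with
  | nil => intro _ ans run p _; simp [pvSumInd]
  | cons v rest ih =>
      intro hsort ans run p hge
      have hvr : ∀ x ∈ rest, v ≤ x := (List.pairwise_cons.mp hsort).1
      have hrs : rest.Pairwise (· ≤ ·) := (List.pairwise_cons.mp hsort).2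
      have hpv : p ≤ v := hge v (by simp)
      have hvne : v + 1 ≠ v := by omega
      have hhead := pv_sumInd_cons v rest hvr
      have hmem : ((v + 1) ∈ v :: rest) ↔ ((v + 1) ∈ rest) := by
        simp [List.mem_cons, hvne]
      rw [List.foldl_cons]
      by_cases hvp : v = p
      · subst hvp
        have hih := ih hrs ans (run + 1) v hvr
        simp only [pvStep]
        rw [if_pos trivial, hih, hhead]
        by_cases h : (v + 1) ∈ rest
        · simp [hmem, h]; ring
        · simp [hmem, h]
      · by_cases hvp1 : v = p + 1
        · have hih := ih hrs (ans + run) 1 v hvr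
          simp only [pvStep, if_neg hvp, if_pos hvp1]
          rw [hih, hhead]
          have hpm : (p + 1) ∈ v :: rest := by simp [hvp1]
          by_cases h : (v + 1) ∈ rest <;> simp [hpm, h] <;> ring
        · have hih := ih hrs ans 1 v hvr
          simp only [pvStep, if_neg hvp, if_neg hvp1]
          rw [hih, hhead]
          have hgt : p + 1 < v := by
            rcases lt_or_eq_of_le hpv with h | h
            · omega
            · exact absurd h.symm hvp
          have hpm : ¬ ((p + 1) ∈ v :: rest) := by
            intro h
            rcases List.mem_cons.mp h with h | h
            · omega
            · have := hvr _ h; omega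
          by_cases h : (v + 1) ∈ rest <;> simp [hpm, h] <;> ring

-- B computes pvSumInd over the sorted list
theorem pv_B_eq (nums : List Int) :
    count_ele_alt nums
      = pvSumInd (PySem.List.sorted nums (fun x => x) false)
                 (PySem.List.sorted nums (fun x => x) false) := by
  unfold count_ele_alt
  have hsort : (PySem.List.sorted nums (fun x => x) false).Pairwise (· ≤ ·) :=
    PySem.List.sorted_pairwise nums (fun x => x)
  have hstep : (fun (st : Int × Int × Option Int) v =>
      match st with
      | (ans, run, none) => (ans, run + 1, some v)
      | (ans, run, some p) =>
        if v = p then (ans, run + 1, some v)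
        else if v = p + 1 then (ans + run, 1, some v)
        else (ans, 1, some v)) = pvStep := rfl
  rw [hstep]
  cases hs : PySem.List.sorted nums (fun x => x) false with
  | nil => simp [pvSumInd]
  | cons v rest =>
      rw [hs] at hsort
      have hvr : ∀ x ∈ rest, v ≤ x := (List.pairwise_cons.mp hsort).1
      have hrs : rest.Pairwise (· ≤ ·) := (List.pairwise_cons.mp hsort).2
      simp only [List.foldl_cons, pvStep, zero_add]
      rw [pv_scan_inv rest hrs 0 1 v hvr]
      rw [pv_sumInd_cons v rest hvr]
      ring

-- the common value is invariant under sorting (a permutation with the same members)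
theorem pv_sumInd_sorted (nums : List Int) :
    pvSumInd (PySem.List.sorted nums (fun x => x) false)
             (PySem.List.sorted nums (fun x => x) false) = pvSumInd nums nums := by
  unfold pvSumInd
  have hperm : (PySem.List.sorted nums (fun x => x) false).Perm nums :=
    PySem.List.sorted_perm nums (fun x => x) false
  have hmemeq : ∀ n ∈ PySem.List.sorted nums (fun x => x) false,
      (if (n + 1) ∈ PySem.List.sorted nums (fun x => x) false then (1:Int) else 0)
        = (if (n + 1) ∈ nums then (1:Int) else 0) := by
    intro n _
    by_cases h : (n + 1) ∈ nums
    · simp [h, (PySem.List.mem_sorted nums (fun x => x) false (n+1)).mpr h]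
    · have : ¬ (n + 1) ∈ PySem.List.sorted nums (fun x => x) false := by
        intro hc; exact h ((PySem.List.mem_sorted nums (fun x => x) false (n+1)).mp hc)
      simp [h, this]
  rw [List.map_congr_left hmemeq]
  exact (hperm.map _).sum_eq

-- ===== VERDICT (by name: the statement is the Claim_ definition above) =====
theorem count_ele_spec : Claim_equal_count_ele := by
  intro nums _
  unfold Spec_count_ele
  rw [pv_A_eq, pv_B_eq, pv_sumInd_sorted]
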